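-- pv_equiv track=rewrite | github.com/Floozutter/google-foobar | level3-find-the-access-codes/slowsolutions.py | slowsolutionA
-- ===== SOURCE A (Python) =====
-- def slowsolutionA(l):
--     def lucky(x, y, z):
--         return (y % x == 0) and (z % y == 0)
--     luckies = 0
--     for i in range(len(l)-2):
--         for j in range(i+1, len(l)-1):
--             for k in range(j+1, len(l)):
--                 if lucky(l[i], l[j], l[k]):
--                     luckies += 1
--     return luckies
-- ===== SOURCE B (Python) =====
-- def slowsolutionA(l):
--     n = len(l)
--     total = 0
--     for j in range(1, n - 1):
--         y = l[j]
--         pred = sum(1 for x in l[:j] if y % x == 0)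
--         succ = sum(1 for z in l[j+1:] if z % y == 0)
--         total += pred * succ
--     return total
-- ===== Notes on version B (the rewrite author's own statement) =====
-- stated objective: faster
-- what changed: Replaces the O(n^3) triple loop with a middle-element scan: for each middle index j, count divisor predecessors and multiple successors and sum the products.
import Mathlib
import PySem

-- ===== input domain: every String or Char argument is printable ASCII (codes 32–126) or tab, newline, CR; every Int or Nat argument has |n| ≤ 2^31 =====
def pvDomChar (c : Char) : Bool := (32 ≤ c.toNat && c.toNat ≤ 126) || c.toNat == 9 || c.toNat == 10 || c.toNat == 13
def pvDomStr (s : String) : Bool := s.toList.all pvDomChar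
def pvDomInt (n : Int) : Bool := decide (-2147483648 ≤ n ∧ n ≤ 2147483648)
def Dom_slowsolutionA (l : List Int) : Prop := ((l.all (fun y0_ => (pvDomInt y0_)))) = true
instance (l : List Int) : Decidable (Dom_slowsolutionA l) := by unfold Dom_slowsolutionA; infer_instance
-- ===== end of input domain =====

-- B replaces A's cubic triple loop by a quadratic per-middle-index scan summing
-- (count of divisor predecessors) * (count of multiple successors).

-- ===== PORT A =====
-- def lucky(x, y, z): return (y % x == 0) and (z % y == 0)
def luckyA (x y z : Int) : Bool := (PySem.Int.mod y x == 0) && (PySem.Int.mod z y == 0)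

def slowsolutionA (l : List Int) : Int :=
  (PySem.List.pyRange 0 (PySem.List.len l - 2) 1).foldl (fun luckies i =>
    (PySem.List.pyRange (i + 1) (PySem.List.len l - 1) 1).foldl (fun luckies j =>
      (PySem.List.pyRange (j + 1) (PySem.List.len l) 1).foldl (fun luckies k =>
        if luckyA (PySem.List.pyGetD l i 0) (PySem.List.pyGetD l j 0) (PySem.List.pyGetD l k 0)
        then luckies + 1 else luckies) luckies) luckies) 0

-- ===== PORT B =====
def slowsolutionA_alt (l : List Int) : Int :=
  (PySem.List.pyRange 1 (PySem.List.len l - 1) 1).foldl (fun total j =>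
    let y := PySem.List.pyGetD l j 0
    let pred : Int := ((PySem.List.slice l none (some j)).countP (fun x => PySem.Int.mod y x == 0) : Int)
    let succ : Int := ((PySem.List.slice l (some (j + 1)) none).countP (fun z => PySem.Int.mod z y == 0) : Int)
    total + pred * succ) 0

-- ===== PRECONDITION & SPEC =====
-- Pre_ excludes exactly the inputs on which the Python A raises ZeroDivisionError (B raises there
-- too): a list of length >= 3 with a 0 anywhere except at the last position (such a 0 is used as a divisor).
def Pre_slowsolutionA (l : List Int) : Prop := l.length < 3 ∨ (0 : Int) ∉ l.dropLast
instance (l : List Int) : Decidable (Pre_slowsolutionA l) := by unfold Pre_slowsolutionA; infer_instance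
def pvWitness_slowsolutionA : List Int := [1, 2, 4, 8]

def Spec_slowsolutionA (l : List Int) (out : Int) : Prop := out = slowsolutionA_alt l
instance (l : List Int) (out : Int) : Decidable (Spec_slowsolutionA l out) := by unfold Spec_slowsolutionA; infer_instance

-- ===== CLAIM (what is proved, stated in full; the proofs are below) =====
def Claim_equal_slowsolutionA : Prop := ∀ (l : List Int), Dom_slowsolutionA l → Pre_slowsolutionA l → Spec_slowsolutionA l (slowsolutionA l)

-- ===== LEMMAS AND PROOFS =====

-- successor count of middle index j: number of k in (j, len l) with l[k] % l[j] == 0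
def pvS (l : List Int) (j : Int) : Int :=
  ((PySem.List.pyRange (j+1) (PySem.List.len l)).map
    (fun k => if PySem.Int.mod (PySem.List.pyGetD l k 0) (PySem.List.pyGetD l j 0) == 0 then (1:Int) else 0)).sum

-- contribution of the pair (i, j): pvS l j if l[j] % l[i] == 0, else 0
def pvG (l : List Int) (i j : Int) : Int :=
  if PySem.Int.mod (PySem.List.pyGetD l j 0) (PySem.List.pyGetD l i 0) == 0 then pvS l j else 0

lemma countP_and_left {α : Type} (a : Bool) (q : α → Bool) (xs : List α) :
    xs.countP (fun x => a && q x) = if a then xs.countP q else 0 := by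
  cases a <;> simp

lemma A_eq (l : List Int) :
    slowsolutionA l =
      ((PySem.List.pyRange 0 (PySem.List.len l - 2)).map (fun i =>
        ((PySem.List.pyRange (i+1) (PySem.List.len l - 1)).map (fun j => pvG l i j)).sum)).sum := by
  unfold slowsolutionA
  simp only [PySem.List.foldl_count_if]
  simp only [PySem.List.foldl_add]
  simp only [luckyA, countP_and_left]
  simp only [apply_ite (fun n : Nat => (n : Int)), Nat.cast_zero, zero_add, pvG, pvS,
    PySem.List.sum_map_ite_one_zero]

-- triangle sum exchange: sum over i < j of g i j, outer-i order vs outer-j order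
lemma tri_ge (g : Int → Int → Int) (m : Int) (hm : 1 ≤ m) :
    ((PySem.List.pyRange 0 (m-1)).map (fun i => ((PySem.List.pyRange (i+1) m).map (g i)).sum)).sum
    = ((PySem.List.pyRange 1 m).map (fun j => ((PySem.List.pyRange 0 j).map (fun i => g i j)).sum)).sum := by
  induction m, hm using Int.le_induction with
  | base =>
    rw [PySem.List.pyRange_one_eq_nil (by omega : (1:Int) - 1 ≤ 0),
        PySem.List.pyRange_one_eq_nil (by omega : (1:Int) ≤ 1)]
    simp
  | succ m h1 ih =>
    have hL : (PySem.List.pyRange 0 (m + 1 - 1)) = PySem.List.pyRange 0 (m-1) ++ [m-1] := by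
      have := PySem.List.pyRange_one_succ_right (a := 0) (b := m - 1) (by omega)
      simpa using this
    have hR : (PySem.List.pyRange 1 (m + 1)) = PySem.List.pyRange 1 m ++ [m] :=
      PySem.List.pyRange_one_succ_right (by omega)
    rw [hL, hR]
    simp only [List.map_append, List.sum_append, List.map_cons, List.map_nil, List.sum_cons,
      List.sum_nil]
    -- inner ranges on the left gain the new endpoint m
    have hinner : ∀ i ∈ PySem.List.pyRange 0 (m-1),
        ((PySem.List.pyRange (i+1) (m+1)).map (g i)).sum
        = ((PySem.List.pyRange (i+1) m).map (g i)).sum + g i m := by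
      intro i hi
      rw [PySem.List.mem_pyRange_one] at hi
      rw [PySem.List.pyRange_one_succ_right (by omega)]
      simp
    rw [List.map_congr_left hinner, PySem.List.sum_map_add_int, ih]
    have hlast : (PySem.List.pyRange (m-1+1) (m+1)).map (g (m-1)) = [g (m-1) m] := by
      have : PySem.List.pyRange (m-1+1) (m+1) = [m] := by
        rw [show m - 1 + 1 = m from by ring]
        exact PySem.List.pyRange_one_singleton m
      rw [this]; rfl
    rw [hlast]
    have hsplit : (PySem.List.pyRange 0 m) = PySem.List.pyRange 0 (m-1) ++ [m-1] := by
      have := PySem.List.pyRange_one_succ_right (a := 0) (b := m - 1) (by omega)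
      simpa using this
    rw [hsplit]
    simp only [List.map_append, List.sum_append, List.map_cons, List.map_nil, List.sum_cons,
      List.sum_nil]
    ring

lemma map_pyGetD_take (l : List Int) (j : Int) (h0 : 0 ≤ j) (hj : j ≤ PySem.List.len l) :
    (PySem.List.pyRange 0 j).map (fun i => PySem.List.pyGetD l i 0) = l.take j.toNat := by
  have hjn : j.toNat ≤ l.length := by simp [PySem.List.len_eq] at hj; omega
  have hlen : PySem.List.len (l.take j.toNat) = j := by
    simp [PySem.List.len_eq]; omega
  have hcong : ∀ i ∈ PySem.List.pyRange 0 j,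
      PySem.List.pyGetD l i 0 = PySem.List.pyGetD (l.take j.toNat) i 0 := by
    intro i hi
    rw [PySem.List.mem_pyRange_one] at hi
    rw [PySem.List.pyGetD_eq_getElem l 0 hi.1 (by omega),
        PySem.List.pyGetD_eq_getElem (l.take j.toNat) 0 hi.1
          (by simp; constructor <;> omega)]
    exact (List.getElem_take).symm
  rw [List.map_congr_left hcong]
  rw [show PySem.List.pyRange 0 j = PySem.List.pyRange 0 (PySem.List.len (l.take j.toNat)) from by
    rw [hlen]]
  exact PySem.List.map_pyGetD_pyRange_zero (l.take j.toNat) 0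

lemma B_eq (l : List Int) :
    slowsolutionA_alt l =
      ((PySem.List.pyRange 1 (PySem.List.len l - 1)).map (fun j =>
        ((PySem.List.pyRange 0 j).map (fun i => pvG l i j)).sum)).sum := by
  unfold slowsolutionA_alt
  simp only [PySem.List.foldl_add, zero_add]
  refine congrArg List.sum (List.map_congr_left ?_)
  intro j hj
  rw [PySem.List.mem_pyRange_one] at hj
  have hjlen : j ≤ PySem.List.len l := by simp [PySem.List.len_eq] at hj ⊢; omega
  -- successor count equals pvS l j
  have hsucc : ((PySem.List.slice l (some (j + 1)) none).countP
      (fun z => PySem.Int.mod z (PySem.List.pyGetD l j 0) == 0) : Int) = pvS l j := by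
    rw [PySem.List.slice_from l (by omega)]
    unfold pvS
    rw [← PySem.List.sum_map_ite_one_zero,
      ← PySem.List.map_pyGetD_pyRange (xs := l) (a := j + 1) (d := 0) (by omega), List.map_map]
    rfl
  -- predecessor count over l[:j] as a count over indices below j
  have hpred : (PySem.List.slice l none (some j)).countP
      (fun x => PySem.Int.mod (PySem.List.pyGetD l j 0) x == 0)
      = ((PySem.List.pyRange 0 j).map
          (fun i => PySem.List.pyGetD l i 0)).countP
          (fun x => PySem.Int.mod (PySem.List.pyGetD l j 0) x == 0) := by
    rw [PySem.List.slice_to l (by omega), map_pyGetD_take l j (by omega) hjlen]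
  simp only [hsucc, hpred]
  -- turn the product into the indexed sum of pvG
  rw [← PySem.List.sum_map_ite_one_zero, List.map_map]
  rw [← List.sum_map_mul_right]
  refine (congrArg List.sum (List.map_congr_left ?_)).symm
  intro i hi
  simp only [pvG, Function.comp]
  by_cases hc : PySem.Int.mod (PySem.List.pyGetD l j 0) (PySem.List.pyGetD l i 0) == 0 <;>
    simp [hc]

-- ===== VERDICT (by name: the statement is the Claim_ definition above) =====
theorem slowsolutionA_spec : Claim_equal_slowsolutionA := by
  unfold Claim_equal_slowsolutionA Spec_slowsolutionA
  intro l _ _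
  rw [A_eq, B_eq]
  by_cases h : 1 ≤ PySem.List.len l - 1
  · have h2 : PySem.List.len l - 2 = PySem.List.len l - 1 - 1 := by ring
    rw [h2]
    exact tri_ge (pvG l) (PySem.List.len l - 1) h
  · rw [PySem.List.pyRange_one_eq_nil (by omega : PySem.List.len l - 2 ≤ 0),
        PySem.List.pyRange_one_eq_nil (by omega : PySem.List.len l - 1 ≤ 1)]
    simp
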